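-- pv_equiv track=rewrite | github.com/lucasosouza/lstm-text-classification-tcu | scripts/cria_dataset_imersoes.py | canonicaliza_texto
-- ===== SOURCE A (Python) =====
-- def canonicaliza_texto(texto):
--     """
--     Retorna o texto canonicalizado:
--      - Converte tudo para caixa baixa
--      - Remove sinais de pontuação (ou substitui por espaços)
--     """
--
--     # Converte texto para caixa baixa
--     texto = texto.lower()
--
--     # Remove sinais de pontuação
--     sinais_de_pontuacao = '?!,.(){}[]\';:"º%'
--     for sinal in sinais_de_pontuacao:
--         texto = texto.replace(sinal,'')
--
--     # Substitui por espaços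
--     sinais_de_pontuacao = '\\//-'
--     for sinal in sinais_de_pontuacao:
--         texto = texto.replace(sinal,' ')
--
--     return texto
-- ===== SOURCE B (Python) =====
-- def canonicaliza_texto(texto):
--     texto = texto.lower()
--     remover = {'?', '!', ',', '.', '(', ')', '{', '}', '[', ']', "'", ';', ':', '"', 'º', '%'}
--     espaco = {'\\', '/', '-'}
--     partes = []
--     for c in texto:
--         if c in remover:
--             continue
--         if c in espaco:
--             partes.append(' ')
--         else:
--             partes.append(c)
--     return ''.join(partes)
-- ===== Notes on version B (the rewrite author's own statement) =====
-- stated objective: alternative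
-- what changed: A rescans the whole string once per punctuation sign (20 str.replace passes); B makes a single pass over the characters with a removal set and a space-replacement set, appending to a list and joining once.
import Mathlib
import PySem

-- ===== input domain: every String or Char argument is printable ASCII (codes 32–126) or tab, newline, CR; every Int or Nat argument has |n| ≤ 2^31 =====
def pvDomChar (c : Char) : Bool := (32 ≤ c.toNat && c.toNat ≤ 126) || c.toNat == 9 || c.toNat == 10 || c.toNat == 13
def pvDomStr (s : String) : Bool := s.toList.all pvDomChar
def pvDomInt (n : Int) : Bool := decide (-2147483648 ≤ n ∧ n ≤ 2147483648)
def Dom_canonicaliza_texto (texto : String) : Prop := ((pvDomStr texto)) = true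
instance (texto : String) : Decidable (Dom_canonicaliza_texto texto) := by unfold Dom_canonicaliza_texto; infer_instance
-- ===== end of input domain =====

-- B replaces A's ~20 full-string replace passes with one single pass over the characters (objective: alternative/simpler; return value only, no mutation).


-- ===== PORT A =====
-- A: lower; then for each char of '?!,.(){}[]\';:"º%' replace it with ''; then for each char of '\\//-' replace it with ' '.
def canonicaliza_texto (texto : String) : String :=
  let t := PySem.Str.lower texto
  let t := (['?', '!', ',', '.', '(', ')', '{', '}', '[', ']', '\'', ';', ':', '"', 'º', '%'] : List Char).foldl
    (fun t sinal => PySem.Str.replace t (String.ofList [sinal]) (String.ofList [])) t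
  let t := (['\\', '/', '/', '-'] : List Char).foldl
    (fun t sinal => PySem.Str.replace t (String.ofList [sinal]) (String.ofList [' '])) t
  t

-- ===== PORT B =====
-- B: lower; then ONE pass over the characters: skip removal chars, emit ' ' for '\' '/' '-', keep the rest; join.
def canonicaliza_texto_alt (texto : String) : String :=
  let remover : List Char := ['?', '!', ',', '.', '(', ')', '{', '}', '[', ']', '\'', ';', ':', '"', 'º', '%']
  let espaco : List Char := ['\\', '/', '-']
  String.ofList ((PySem.Str.lower texto).toList.foldl
    (fun partes c =>
      if remover.contains c then partes
      else if espaco.contains c then partes ++ [' ']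
      else partes ++ [c]) [])

-- ===== PRECONDITION & SPEC =====
def Spec_canonicaliza_texto (texto : String) (out : String) : Prop := out = canonicaliza_texto_alt texto
instance (texto : String) (out : String) : Decidable (Spec_canonicaliza_texto texto out) := by unfold Spec_canonicaliza_texto; infer_instance

-- ===== CLAIM (what is proved, stated in full; the proofs are below) =====
def Claim_equal_canonicaliza_texto : Prop := ∀ (texto : String), Dom_canonicaliza_texto texto → Spec_canonicaliza_texto texto (canonicaliza_texto texto)

-- ===== LEMMAS AND PROOFS =====

-- Python replace with a single-character pattern acts characterwise.
lemma replace_go_single (c : Char) (new : List Char) :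
    ∀ (fuel : Nat) (l acc : List Char), l.length ≤ fuel →
      PySem.Chars.replace.go [c] new fuel l acc
        = acc.reverse ++ l.flatMap (fun x => if x = c then new else [x]) := by
  intro fuel
  induction fuel with
  | zero =>
    intro l acc h
    have : l = [] := List.length_eq_zero_iff.mp (Nat.le_zero.mp h)
    subst this
    simp [PySem.Chars.replace.go]
  | succ n ih =>
    intro l acc h
    cases l with
    | nil => simp [PySem.Chars.replace.go]
    | cons x t =>
      by_cases hx : x = c
      · subst hx
        have hpre : List.isPrefixOf [x] (x :: t) = true := by
          simp [List.isPrefixOf]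
        simp only [PySem.Chars.replace.go, hpre, if_pos]
        rw [show List.drop (List.length [x]) (x :: t) = t by simp]
        rw [ih t (new.reverse ++ acc) (by simpa using Nat.lt_succ_iff.mp (by simpa using h))]
        simp
      · have hpre : List.isPrefixOf [c] (x :: t) = false := by
          simp [List.isPrefixOf]; exact fun hh => (hx hh.symm).elim
        simp only [PySem.Chars.replace.go, hpre]
        rw [if_neg (by simp)]
        rw [ih t (x :: acc) (by simpa using Nat.lt_succ_iff.mp (by simpa using h))]
        simp [hx]

lemma replace_single (cs : List Char) (c : Char) (new : List Char) :
    PySem.Chars.replace cs [c] new = cs.flatMap (fun x => if x = c then new else [x]) := by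
  rw [PySem.Chars.replace]
  simp only [List.isEmpty_cons, Bool.false_eq_true, if_false]
  exact replace_go_single c new cs.length cs [] (le_refl _)

-- the characterwise function A's whole replace pipeline computes
def pvStep (c : Char) : List Char :=
  if c = '?' then [] else if c = '!' then [] else if c = ',' then [] else if c = '.' then []
  else if c = '(' then [] else if c = ')' then [] else if c = '{' then [] else if c = '}' then []
  else if c = '[' then [] else if c = ']' then [] else if c = '\'' then [] else if c = ';' then []
  else if c = ':' then [] else if c = '"' then [] else if c = 'º' then [] else if c = '%' then []
  else if c = '\\' then [' '] else if c = '/' then [' '] else if c = '-' then [' '] else [c]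

set_option maxHeartbeats 2000000 in
lemma a_as_flatMap (cs : List Char) :
    ((['\\', '/', '/', '-'] : List Char).foldl
      (fun t sinal => PySem.Chars.replace t [sinal] [' '])
      ((['?', '!', ',', '.', '(', ')', '{', '}', '[', ']', '\'', ';', ':', '"', 'º', '%'] : List Char).foldl
        (fun t sinal => PySem.Chars.replace t [sinal] []) cs))
    = cs.flatMap pvStep := by
  simp only [List.foldl_cons, List.foldl_nil, replace_single, List.flatMap_assoc]
  congr 1
  funext x
  by_cases hx : x ∈ (['?', '!', ',', '.', '(', ')', '{', '}', '[', ']', '\'', ';', ':', '"', 'º', '%', '\\', '/', '-'] : List Char)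
  · fin_cases hx <;> rfl
  · simp only [List.mem_cons, List.not_mem_nil, or_false, not_or] at hx
    obtain ⟨n1,n2,n3,n4,n5,n6,n7,n8,n9,n10,n11,n12,n13,n14,n15,n16,n17,n18,n19⟩ := hx
    simp [pvStep, n1,n2,n3,n4,n5,n6,n7,n8,n9,n10,n11,n12,n13,n14,n15,n16,n17,n18,n19]

lemma b_foldl_as_flatMap (cs : List Char) (acc : List Char) :
    cs.foldl
      (fun partes c =>
        if (['?', '!', ',', '.', '(', ')', '{', '}', '[', ']', '\'', ';', ':', '"', 'º', '%'] : List Char).contains c then partes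
        else if (['\\', '/', '-'] : List Char).contains c then partes ++ [' ']
        else partes ++ [c]) acc
    = acc ++ cs.flatMap pvStep := by
  induction cs generalizing acc with
  | nil => simp
  | cons c t ih =>
    rw [List.foldl_cons, ih]
    have hstep : (if (['?', '!', ',', '.', '(', ')', '{', '}', '[', ']', '\'', ';', ':', '"', 'º', '%'] : List Char).contains c then acc
        else if (['\\', '/', '-'] : List Char).contains c then acc ++ [' ']
        else acc ++ [c]) = acc ++ pvStep c := by
      unfold pvStep
      by_cases h1 : (['?', '!', ',', '.', '(', ')', '{', '}', '[', ']', '\'', ';', ':', '"', 'º', '%'] : List Char).contains c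
      · rw [if_pos h1]
        simp only [List.contains_eq_mem, List.mem_cons, List.not_mem_nil, or_false, decide_eq_true_eq] at h1
        rcases h1 with h | h | h | h | h | h | h | h | h | h | h | h | h | h | h | h <;> subst h <;> simp
      · rw [if_neg h1]
        simp only [List.contains_eq_mem, List.mem_cons, List.not_mem_nil, or_false, decide_eq_true_eq] at h1
        push_neg at h1
        by_cases h2 : (['\\', '/', '-'] : List Char).contains c
        · rw [if_pos h2]
          simp only [List.contains_eq_mem, List.mem_cons, List.not_mem_nil, or_false, decide_eq_true_eq] at h2
          obtain ⟨n1,n2,n3,n4,n5,n6,n7,n8,n9,n10,n11,n12,n13,n14,n15,n16⟩ := h1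
          rcases h2 with h | h | h <;> subst h <;> simp_all
        · rw [if_neg h2]
          simp only [List.contains_eq_mem, List.mem_cons, List.not_mem_nil, or_false, decide_eq_true_eq] at h2
          push_neg at h2
          obtain ⟨n1,n2,n3,n4,n5,n6,n7,n8,n9,n10,n11,n12,n13,n14,n15,n16⟩ := h1
          obtain ⟨m1,m2,m3⟩ := h2
          simp_all
    rw [hstep, List.append_assoc]
    simp [List.flatMap_cons]

lemma str_fold_replace (pat : List Char) (new : List Char) :
    ∀ (t : String), (pat.foldl (fun t sinal => PySem.Str.replace t (String.ofList [sinal]) (String.ofList new)) t).toList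
      = pat.foldl (fun cs sinal => PySem.Chars.replace cs [sinal] new) t.toList := by
  induction pat with
  | nil => intro t; rfl
  | cons c r ih =>
    intro t
    rw [List.foldl_cons, List.foldl_cons, ih]
    simp [PySem.Str.toList_replace]

-- ===== VERDICT (by name: the statement is the Claim_ definition above) =====
theorem canonicaliza_texto_spec : Claim_equal_canonicaliza_texto := by
  intro texto _
  unfold Spec_canonicaliza_texto canonicaliza_texto canonicaliza_texto_alt
  dsimp only
  apply String.toList_inj.mp
  rw [String.toList_ofList, b_foldl_as_flatMap _ [], List.nil_append, ← a_as_flatMap]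
  rw [str_fold_replace, str_fold_replace]
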